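-- pv_equiv track=rewrite | github.com/agentmorpheus77/agent-harness-platform | backend/core/skills_manager.py | detect_repo_skills
-- ===== SOURCE A (Python) =====
-- def detect_repo_skills(file_tree: list[str]) -> list[str]:
--     """Detect relevant skills based on files present in a repository.
--
--     Args:
--         file_tree: List of file/directory names at the repo root level.
--
--     Returns:
--         List of skill names that should be loaded.
--     """
--     skills: list[str] = []
--     file_set = set(file_tree)
--     file_lower = {f.lower() for f in file_tree}
--
--     # TypeScript / React
--     if "package.json" in file_set or "tsconfig.json" in file_set:
--         skills.append("typescript")
--
--     # Railway
--     if "railway.toml" in file_set or "nixpacks.toml" in file_set or "railway.json" in file_set: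
--         skills.append("railway")
--
--     # Python
--     if "requirements.txt" in file_set or "pyproject.toml" in file_set or "setup.py" in file_set:
--         skills.append("python")
--
--     # Testing — check for test directories or test file patterns
--     test_indicators = {"tests", "test", "__tests__", "spec", "pytest.ini", "jest.config.js", "vitest.config.ts"}
--     if test_indicators & file_lower:
--         skills.append("testing")
--     elif any(f for f in file_tree if ".test." in f or ".spec." in f or "_test." in f):
--         skills.append("testing")
--
--     # Tailwind
--     if any(f.startswith("tailwind.config") for f in file_tree):
--         skills.append("tailwind")
--     # Also check for tailwind in CSS files — but we can only check filenames here
--     # The caller can do deeper analysis if needed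
--
--     # i18n
--     i18n_indicators = {"i18n", "locales", "translations", "lang"}
--     if i18n_indicators & file_lower:
--         skills.append("i18n")
--
--     return skills
-- ===== SOURCE B (Python) =====
-- _EXACT = {
--     "package.json": "typescript", "tsconfig.json": "typescript",
--     "railway.toml": "railway", "nixpacks.toml": "railway", "railway.json": "railway",
--     "requirements.txt": "python", "pyproject.toml": "python", "setup.py": "python",
-- }
-- _LOWER = {
--     "tests": "testing", "test": "testing", "__tests__": "testing", "spec": "testing",
--     "pytest.ini": "testing", "jest.config.js": "testing", "vitest.config.ts": "testing",
--     "i18n": "i18n", "locales": "i18n", "translations": "i18n", "lang": "i18n",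
-- }
-- _ORDER = ("typescript", "railway", "python", "testing", "tailwind", "i18n")
--
--
-- def detect_repo_skills(file_tree: list[str]) -> list[str]:
--     """Single pass over the files: classify each file into the skills it
--     triggers, union the results, then emit in the canonical rule order."""
--     found = set()
--     for f in file_tree:
--         skill = _EXACT.get(f)
--         if skill is not None:
--             found.add(skill)
--         skill = _LOWER.get(f.lower())
--         if skill is not None:
--             found.add(skill)
--         if ".test." in f or ".spec." in f or "_test." in f:
--             found.add("testing")
--         if f.startswith("tailwind.config"):
--             found.add("tailwind")
--     return [s for s in _ORDER if s in found]
-- ===== Notes on version B (the rewrite author's own statement) =====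
-- stated objective: alternative
-- what changed: Inverts the traversal: instead of A's six per-rule scans over the file list (set-membership tests, a set intersection, two any-scans), B makes one pass over the files, classifying each file via exact-name and lowercased-name lookup tables plus the two pattern checks into a found-set, then emits the skills in canonical rule order.
import Mathlib
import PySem

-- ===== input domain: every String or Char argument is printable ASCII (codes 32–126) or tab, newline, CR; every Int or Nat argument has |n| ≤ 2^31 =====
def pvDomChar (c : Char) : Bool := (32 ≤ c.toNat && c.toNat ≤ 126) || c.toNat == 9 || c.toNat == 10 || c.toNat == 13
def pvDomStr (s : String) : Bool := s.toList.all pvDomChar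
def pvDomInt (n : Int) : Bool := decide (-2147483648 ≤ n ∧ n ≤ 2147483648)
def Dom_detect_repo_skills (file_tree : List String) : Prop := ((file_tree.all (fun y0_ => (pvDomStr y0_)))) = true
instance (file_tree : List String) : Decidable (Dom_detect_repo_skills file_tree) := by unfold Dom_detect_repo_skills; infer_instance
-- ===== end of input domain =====

-- B inverts the traversal: instead of A's per-rule scans over the file list, B makes one pass over
-- the files, classifying each file into the skills it triggers (exact-name and lowercased-name
-- lookup tables, plus the two pattern checks) into a found-set, then emits the canonical order.

-- ===== PORT A =====
def detect_repo_skills (file_tree : List String) : List String :=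
  let skills : List String := []
  let file_set : PySem.Set String := PySem.Set.ofList file_tree
  let file_lower : PySem.Set String := PySem.Set.ofList (file_tree.map PySem.Str.lower)
  -- TypeScript / React
  let skills := if PySem.Set.contains file_set "package.json" || PySem.Set.contains file_set "tsconfig.json" then skills ++ ["typescript"] else skills
  -- Railway
  let skills := if PySem.Set.contains file_set "railway.toml" || PySem.Set.contains file_set "nixpacks.toml" || PySem.Set.contains file_set "railway.json" then skills ++ ["railway"] else skills
  -- Python
  let skills := if PySem.Set.contains file_set "requirements.txt" || PySem.Set.contains file_set "pyproject.toml" || PySem.Set.contains file_set "setup.py" then skills ++ ["python"] else skills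
  -- Testing: if test_indicators & file_lower ... elif any(...)
  let test_indicators : PySem.Set String := PySem.Set.ofList ["tests", "test", "__tests__", "spec", "pytest.ini", "jest.config.js", "vitest.config.ts"]
  let skills :=
    if !(PySem.Set.inter test_indicators file_lower).isEmpty then skills ++ ["testing"]
    else if file_tree.any (fun f => PySem.Str.isIn ".test." f || PySem.Str.isIn ".spec." f || PySem.Str.isIn "_test." f) then skills ++ ["testing"]
    else skills
  -- Tailwind
  let skills := if file_tree.any (fun f => PySem.Str.startswith f "tailwind.config") then skills ++ ["tailwind"] else skills
  -- i18n
  let i18n_indicators : PySem.Set String := PySem.Set.ofList ["i18n", "locales", "translations", "lang"]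
  let skills := if !(PySem.Set.inter i18n_indicators file_lower).isEmpty then skills ++ ["i18n"] else skills
  skills

-- ===== PORT B =====
-- the _EXACT and _LOWER lookup tables of Source B
def pvExact : PySem.Dict String String := PySem.Dict.ofList
  [("package.json", "typescript"), ("tsconfig.json", "typescript"),
   ("railway.toml", "railway"), ("nixpacks.toml", "railway"), ("railway.json", "railway"),
   ("requirements.txt", "python"), ("pyproject.toml", "python"), ("setup.py", "python")]

def pvLower : PySem.Dict String String := PySem.Dict.ofList
  [("tests", "testing"), ("test", "testing"), ("__tests__", "testing"), ("spec", "testing"),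
   ("pytest.ini", "testing"), ("jest.config.js", "testing"), ("vitest.config.ts", "testing"),
   ("i18n", "i18n"), ("locales", "i18n"), ("translations", "i18n"), ("lang", "i18n")]

def pvOrder : List String := ["typescript", "railway", "python", "testing", "tailwind", "i18n"]

-- the loop body of Source B: the skills a single file triggers, added to the found-set
def pvClassify (found : PySem.Set String) (f : String) : PySem.Set String :=
  let found := match PySem.Dict.get? pvExact f with
    | some sk => PySem.Set.add found sk
    | none => found
  let found := match PySem.Dict.get? pvLower (PySem.Str.lower f) with
    | some sk => PySem.Set.add found sk
    | none => found
  let found := if PySem.Str.isIn ".test." f || PySem.Str.isIn ".spec." f || PySem.Str.isIn "_test." f then PySem.Set.add found "testing" else found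
  let found := if PySem.Str.startswith f "tailwind.config" then PySem.Set.add found "tailwind" else found
  found

def detect_repo_skills_alt (file_tree : List String) : List String :=
  let found := file_tree.foldl pvClassify PySem.Set.empty
  pvOrder.filter (fun s => PySem.Set.contains found s)

-- ===== PRECONDITION & SPEC =====
def Spec_detect_repo_skills (file_tree : List String) (out : List String) : Prop := out = detect_repo_skills_alt file_tree
instance (file_tree : List String) (out : List String) : Decidable (Spec_detect_repo_skills file_tree out) := by unfold Spec_detect_repo_skills; infer_instance

-- ===== CLAIM (what is proved, stated in full; the proofs are below) =====
def Claim_equal_detect_repo_skills : Prop := ∀ (file_tree : List String), Dom_detect_repo_skills file_tree → Spec_detect_repo_skills file_tree (detect_repo_skills file_tree)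

-- ===== LEMMAS AND PROOFS =====

-- the condition on a single file under which pvClassify adds skill sk
def pvFire (f sk : String) : Bool :=
  (PySem.Dict.get? pvExact f == some sk) ||
  (PySem.Dict.get? pvLower (PySem.Str.lower f) == some sk) ||
  (sk == "testing" && (PySem.Str.isIn ".test." f || PySem.Str.isIn ".spec." f || PySem.Str.isIn "_test." f)) ||
  (sk == "tailwind" && PySem.Str.startswith f "tailwind.config")

set_option maxHeartbeats 1000000 in
theorem mem_pvClassify (sk : String) (found : PySem.Set String) (f : String) :
    sk ∈ pvClassify found f ↔ sk ∈ found ∨ pvFire f sk = true := by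
  unfold pvClassify pvFire
  rcases hE : PySem.Dict.get? pvExact f with _ | e <;>
  rcases hL : PySem.Dict.get? pvLower (PySem.Str.lower f) with _ | l <;>
  split_ifs <;>
  simp_all [PySem.Set.mem_add] <;> tauto

theorem mem_fold (sk : String) (found : PySem.Set String) (xs : List String) :
    sk ∈ xs.foldl pvClassify found ↔ sk ∈ found ∨ ∃ f ∈ xs, pvFire f sk = true := by
  induction xs generalizing found with
  | nil => simp
  | cons x t ih => simp [List.foldl_cons, ih, mem_pvClassify]; tauto

-- the emitted list as a function of the six rule outcomes
def pvEmit (b1 b2 b3 b4 b5 b6 : Bool) : List String :=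
  (if b1 then ["typescript"] else []) ++ (if b2 then ["railway"] else []) ++
  (if b3 then ["python"] else []) ++ (if b4 then ["testing"] else []) ++
  (if b5 then ["tailwind"] else []) ++ (if b6 then ["i18n"] else [])

theorem table_eq (c1 c2 c3 c4 c5 c6 c7 : Bool) :
    (let s0 : List String := []
     let s1 := if c1 then s0 ++ ["typescript"] else s0
     let s2 := if c2 then s1 ++ ["railway"] else s1
     let s3 := if c3 then s2 ++ ["python"] else s2
     let s4 := if c4 then s3 ++ ["testing"] else if c5 then s3 ++ ["testing"] else s3
     let s5 := if c6 then s4 ++ ["tailwind"] else s4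
     if c7 then s5 ++ ["i18n"] else s5) = pvEmit c1 c2 c3 (c4 || c5) c6 c7 := by
  revert c1 c2 c3 c4 c5 c6 c7; decide

-- membership characterisation of first-match lookup over a key-nodup pair list
theorem find_pairs {prs : List (String × String)} (f : String) (v : String)
    (hnd : (prs.map Prod.fst).Nodup) :
    (Option.map Prod.snd (List.find? (fun p => p.1 == f) prs) = some v) ↔ (f, v) ∈ prs := by
  induction prs with
  | nil => simp
  | cons p rest ih =>
    obtain ⟨k, w⟩ := p
    simp only [List.map_cons, List.nodup_cons] at hnd
    rw [List.find?_cons]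
    by_cases hk : k = f
    · subst hk
      simp_all [List.mem_map, eq_comm]
    · have hb : ((k, w).1 == f) = false := by simp [hk]
      rw [hb]
      simp [ih hnd.2, Ne.symm hk]

theorem exact_get (f v : String) : PySem.Dict.get? pvExact f = some v ↔
    (f, v) ∈ ([("package.json", "typescript"), ("tsconfig.json", "typescript"),
      ("railway.toml", "railway"), ("nixpacks.toml", "railway"), ("railway.json", "railway"),
      ("requirements.txt", "python"), ("pyproject.toml", "python"), ("setup.py", "python")] : List (String × String)) := by
  have hi : pvExact.items = [("package.json", "typescript"), ("tsconfig.json", "typescript"),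
      ("railway.toml", "railway"), ("nixpacks.toml", "railway"), ("railway.json", "railway"),
      ("requirements.txt", "python"), ("pyproject.toml", "python"), ("setup.py", "python")] := by decide
  rw [PySem.Dict.get?, hi]
  exact find_pairs f v (by decide)

theorem lower_get (f v : String) : PySem.Dict.get? pvLower f = some v ↔
    (f, v) ∈ ([("tests", "testing"), ("test", "testing"), ("__tests__", "testing"), ("spec", "testing"),
      ("pytest.ini", "testing"), ("jest.config.js", "testing"), ("vitest.config.ts", "testing"),
      ("i18n", "i18n"), ("locales", "i18n"), ("translations", "i18n"), ("lang", "i18n")] : List (String × String)) := by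
  have hi : pvLower.items = [("tests", "testing"), ("test", "testing"), ("__tests__", "testing"), ("spec", "testing"),
      ("pytest.ini", "testing"), ("jest.config.js", "testing"), ("vitest.config.ts", "testing"),
      ("i18n", "i18n"), ("locales", "i18n"), ("translations", "i18n"), ("lang", "i18n")] := by decide
  rw [PySem.Dict.get?, hi]
  exact find_pairs f v (by decide)

-- pvFire at each of the six literal skills, as a condition on the file
theorem fire_ts (f : String) : pvFire f "typescript" = true ↔ f = "package.json" ∨ f = "tsconfig.json" := by
  simp [pvFire, exact_get, lower_get, Prod.ext_iff]
theorem fire_rw (f : String) : pvFire f "railway" = true ↔ f = "railway.toml" ∨ f = "nixpacks.toml" ∨ f = "railway.json" := by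
  simp [pvFire, exact_get, lower_get, Prod.ext_iff]
theorem fire_py (f : String) : pvFire f "python" = true ↔ f = "requirements.txt" ∨ f = "pyproject.toml" ∨ f = "setup.py" := by
  simp [pvFire, exact_get, lower_get, Prod.ext_iff]
theorem fire_test (f : String) : pvFire f "testing" = true ↔
    PySem.Str.lower f ∈ (["tests", "test", "__tests__", "spec", "pytest.ini", "jest.config.js", "vitest.config.ts"] : List String) ∨
    (PySem.Str.isIn ".test." f || PySem.Str.isIn ".spec." f || PySem.Str.isIn "_test." f) = true := by
  simp [pvFire, exact_get, lower_get, Prod.ext_iff]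
theorem fire_tw (f : String) : pvFire f "tailwind" = true ↔ PySem.Str.startswith f "tailwind.config" = true := by
  simp [pvFire, exact_get, lower_get, Prod.ext_iff]
theorem fire_i18n (f : String) : pvFire f "i18n" = true ↔
    PySem.Str.lower f ∈ (["i18n", "locales", "translations", "lang"] : List String) := by
  simp [pvFire, exact_get, lower_get, Prod.ext_iff]

theorem inter_nonempty (S : List String) (xs : List String) :
    (PySem.Set.inter (PySem.Set.ofList S) (PySem.Set.ofList (xs.map PySem.Str.lower))).isEmpty = false
      ↔ ∃ f ∈ xs, PySem.Str.lower f ∈ S := by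
  rw [List.isEmpty_eq_false_iff_exists_mem]
  constructor
  · rintro ⟨x, hx⟩
    rw [PySem.Set.mem_inter] at hx
    obtain ⟨hS, hT⟩ := hx
    rw [PySem.Set.mem_ofList] at hS hT
    obtain ⟨f, hf, rfl⟩ := List.mem_map.mp hT
    exact ⟨f, hf, hS⟩
  · rintro ⟨f, hf, hS⟩
    exact ⟨PySem.Str.lower f, by
      rw [PySem.Set.mem_inter, PySem.Set.mem_ofList, PySem.Set.mem_ofList]
      exact ⟨hS, List.mem_map.mpr ⟨f, hf, rfl⟩⟩⟩

theorem alt_eq (xs : List String) : detect_repo_skills_alt xs =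
    pvEmit (decide (∃ f ∈ xs, pvFire f "typescript" = true)) (decide (∃ f ∈ xs, pvFire f "railway" = true))
      (decide (∃ f ∈ xs, pvFire f "python" = true)) (decide (∃ f ∈ xs, pvFire f "testing" = true))
      (decide (∃ f ∈ xs, pvFire f "tailwind" = true)) (decide (∃ f ∈ xs, pvFire f "i18n" = true)) := by
  have hc : ∀ sk : String, PySem.Set.contains (xs.foldl pvClassify PySem.Set.empty) sk
      = decide (∃ f ∈ xs, pvFire f sk = true) := by
    intro sk
    rw [Bool.eq_iff_iff]
    simp [mem_fold, PySem.Set.empty]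
  unfold detect_repo_skills_alt pvOrder
  simp only [List.filter_cons, List.filter_nil, hc]
  generalize (decide (∃ f ∈ xs, pvFire f "typescript" = true)) = b1
  generalize (decide (∃ f ∈ xs, pvFire f "railway" = true)) = b2
  generalize (decide (∃ f ∈ xs, pvFire f "python" = true)) = b3
  generalize (decide (∃ f ∈ xs, pvFire f "testing" = true)) = b4
  generalize (decide (∃ f ∈ xs, pvFire f "tailwind" = true)) = b5
  generalize (decide (∃ f ∈ xs, pvFire f "i18n" = true)) = b6
  cases b1 <;> cases b2 <;> cases b3 <;> cases b4 <;> cases b5 <;> cases b6 <;> simp [pvEmit]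

theorem a_eq (xs : List String) : detect_repo_skills xs =
    pvEmit (decide (∃ f ∈ xs, pvFire f "typescript" = true)) (decide (∃ f ∈ xs, pvFire f "railway" = true))
      (decide (∃ f ∈ xs, pvFire f "python" = true)) (decide (∃ f ∈ xs, pvFire f "testing" = true))
      (decide (∃ f ∈ xs, pvFire f "tailwind" = true)) (decide (∃ f ∈ xs, pvFire f "i18n" = true)) := by
  have h1 : (PySem.Set.contains (PySem.Set.ofList xs) "package.json" || PySem.Set.contains (PySem.Set.ofList xs) "tsconfig.json")
      = decide (∃ f ∈ xs, pvFire f "typescript" = true) := by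
    rw [Bool.eq_iff_iff]
    simp only [Bool.or_eq_true, PySem.Set.contains_iff, PySem.Set.mem_ofList, decide_eq_true_eq, fire_ts]
    aesop
  have h2 : (PySem.Set.contains (PySem.Set.ofList xs) "railway.toml" || PySem.Set.contains (PySem.Set.ofList xs) "nixpacks.toml" || PySem.Set.contains (PySem.Set.ofList xs) "railway.json")
      = decide (∃ f ∈ xs, pvFire f "railway" = true) := by
    rw [Bool.eq_iff_iff]
    simp only [Bool.or_eq_true, PySem.Set.contains_iff, PySem.Set.mem_ofList, decide_eq_true_eq, fire_rw]
    aesop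
  have h3 : (PySem.Set.contains (PySem.Set.ofList xs) "requirements.txt" || PySem.Set.contains (PySem.Set.ofList xs) "pyproject.toml" || PySem.Set.contains (PySem.Set.ofList xs) "setup.py")
      = decide (∃ f ∈ xs, pvFire f "python" = true) := by
    rw [Bool.eq_iff_iff]
    simp only [Bool.or_eq_true, PySem.Set.contains_iff, PySem.Set.mem_ofList, decide_eq_true_eq, fire_py]
    aesop
  have h4 : (!(PySem.Set.inter (PySem.Set.ofList ["tests", "test", "__tests__", "spec", "pytest.ini", "jest.config.js", "vitest.config.ts"]) (PySem.Set.ofList (xs.map PySem.Str.lower))).isEmpty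
      || xs.any (fun f => PySem.Str.isIn ".test." f || PySem.Str.isIn ".spec." f || PySem.Str.isIn "_test." f))
      = decide (∃ f ∈ xs, pvFire f "testing" = true) := by
    rw [Bool.eq_iff_iff]
    simp only [Bool.or_eq_true, Bool.not_eq_true', inter_nonempty, List.any_eq_true,
      decide_eq_true_eq, fire_test]
    constructor
    · rintro (⟨f, hf, hS⟩ | ⟨f, hf, hp⟩)
      · exact ⟨f, hf, Or.inl hS⟩
      · exact ⟨f, hf, Or.inr hp⟩
    · rintro ⟨f, hf, hS | hp⟩
      · exact Or.inl ⟨f, hf, hS⟩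
      · exact Or.inr ⟨f, hf, hp⟩
  have h5 : (xs.any (fun f => PySem.Str.startswith f "tailwind.config"))
      = decide (∃ f ∈ xs, pvFire f "tailwind" = true) := by
    rw [Bool.eq_iff_iff]
    simp only [List.any_eq_true, decide_eq_true_eq, fire_tw]
  have h6 : (!(PySem.Set.inter (PySem.Set.ofList ["i18n", "locales", "translations", "lang"]) (PySem.Set.ofList (xs.map PySem.Str.lower))).isEmpty)
      = decide (∃ f ∈ xs, pvFire f "i18n" = true) := by
    rw [Bool.eq_iff_iff]
    simp only [Bool.not_eq_true', inter_nonempty, decide_eq_true_eq, fire_i18n]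
  have ht := table_eq
    (PySem.Set.contains (PySem.Set.ofList xs) "package.json" || PySem.Set.contains (PySem.Set.ofList xs) "tsconfig.json")
    (PySem.Set.contains (PySem.Set.ofList xs) "railway.toml" || PySem.Set.contains (PySem.Set.ofList xs) "nixpacks.toml" || PySem.Set.contains (PySem.Set.ofList xs) "railway.json")
    (PySem.Set.contains (PySem.Set.ofList xs) "requirements.txt" || PySem.Set.contains (PySem.Set.ofList xs) "pyproject.toml" || PySem.Set.contains (PySem.Set.ofList xs) "setup.py")
    (!(PySem.Set.inter (PySem.Set.ofList ["tests", "test", "__tests__", "spec", "pytest.ini", "jest.config.js", "vitest.config.ts"]) (PySem.Set.ofList (xs.map PySem.Str.lower))).isEmpty)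
    (xs.any (fun f => PySem.Str.isIn ".test." f || PySem.Str.isIn ".spec." f || PySem.Str.isIn "_test." f))
    (xs.any (fun f => PySem.Str.startswith f "tailwind.config"))
    (!(PySem.Set.inter (PySem.Set.ofList ["i18n", "locales", "translations", "lang"]) (PySem.Set.ofList (xs.map PySem.Str.lower))).isEmpty)
  unfold detect_repo_skills
  refine ht.trans ?_
  rw [h1, h2, h3, h4, h5, h6]

-- ===== VERDICT (by name: the statement is the Claim_ definition above) =====
theorem detect_repo_skills_spec : Claim_equal_detect_repo_skills := by
  intro xs _
  show detect_repo_skills xs = detect_repo_skills_alt xs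
  rw [a_eq, alt_eq]
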